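-- pv_equiv track=rewrite | github.com/vgoliber/airline-hubs | demo-dqm.py | get_layout_from_sample
-- ===== SOURCE A (Python) =====
-- def get_layout_from_sample(ss, city_names, p):
--
--     hubs = []
--     legs = []
--     valid = True
--     for key, val in ss.items():
--         if key == val:
--             hubs.append(city_names[key])
--         else:
--             legs.append((city_names[key],city_names[val]))
--             if ss[val] != val:
--                 valid = False
--
--     if len(hubs) != p:
--         valid = False
--
--     return hubs, legs, valid
-- ===== SOURCE B (Python) =====
-- def get_layout_from_sample(ss, city_names, p):
--     # Graph view: validity is "every destination in the assignment is a hub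
--     # (a fixed point) and there are exactly p hubs".  Build the fixed-point
--     # key set once; hubs/legs and validity are then all decided by set
--     # membership -- no per-leg dict re-lookups and no mutated flag.
--     hub_keys = {k for k, v in ss.items() if k == v}
--     hubs = [city_names[k] for k in ss if k in hub_keys]
--     legs = [(city_names[k], city_names[v]) for k, v in ss.items() if k not in hub_keys]
--     valid = len(hub_keys) == p and all(v in hub_keys for v in ss.values())
--     return hubs, legs, valid
-- ===== Notes on version B (the rewrite author's own statement) =====
-- stated objective: alternative
-- what changed: B recasts validity as a graph property: it builds the fixed-point (hub) key set once and decides hubs/legs and validity by membership in that set (all destinations must be hubs), instead of A's single pass with per-leg dict re-lookups and an incrementally mutated flag.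
import Mathlib
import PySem

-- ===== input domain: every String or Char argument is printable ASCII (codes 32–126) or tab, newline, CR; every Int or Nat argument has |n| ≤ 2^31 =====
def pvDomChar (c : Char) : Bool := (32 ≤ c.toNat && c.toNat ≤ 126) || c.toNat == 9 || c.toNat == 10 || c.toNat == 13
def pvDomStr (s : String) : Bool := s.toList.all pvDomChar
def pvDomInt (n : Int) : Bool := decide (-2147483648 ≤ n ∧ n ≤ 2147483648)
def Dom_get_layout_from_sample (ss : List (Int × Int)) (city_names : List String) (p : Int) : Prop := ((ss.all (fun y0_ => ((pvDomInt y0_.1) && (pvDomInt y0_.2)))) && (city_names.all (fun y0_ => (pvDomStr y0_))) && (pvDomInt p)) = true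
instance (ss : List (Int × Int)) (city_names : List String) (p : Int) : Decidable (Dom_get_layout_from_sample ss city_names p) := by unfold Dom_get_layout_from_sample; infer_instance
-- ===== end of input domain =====

-- B builds the fixed-point (hub) key set once and decides hubs/legs and validity by
-- membership in it, instead of A's per-leg dict re-lookups and a mutated flag; same cost.

-- city_names[i]  (total stand-in; Pre_ guarantees the index is in range)
def pvCn (cn : List String) (i : Int) : String := (PySem.List.pyGet? cn i).getD ""

-- ss[k]  (dict lookup = first match in the association list)
def pvDget (ss : List (Int × Int)) (k : Int) : Option Int :=
  (ss.find? (fun kv => kv.1 == k)).map Prod.snd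

-- ===== PORT A =====
def get_layout_from_sample (ss : List (Int × Int)) (city_names : List String) (p : Int) : List String × (List (String × String)) × Bool :=
  let st := ss.foldl
    (fun (acc : List String × List (String × String) × Bool) kv =>
      if kv.1 == kv.2 then
        (acc.1 ++ [pvCn city_names kv.1], acc.2.1, acc.2.2)
      else
        (acc.1, acc.2.1 ++ [(pvCn city_names kv.1, pvCn city_names kv.2)],
         if pvDget ss kv.2 != some kv.2 then false else acc.2.2))
    ([], [], true)
  let valid := if (st.1.length : Int) ≠ p then false else st.2.2
  (st.1, st.2.1, valid)

-- ===== PORT B =====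
def get_layout_from_sample_alt (ss : List (Int × Int)) (city_names : List String) (p : Int) : List String × (List (String × String)) × Bool :=
  let hubKeys : PySem.Set Int :=
    PySem.Set.ofList ((ss.filter (fun kv => kv.1 == kv.2)).map Prod.fst)
  let hubs := ((ss.map Prod.fst).filter (fun k => hubKeys.contains k)).map
      (fun k => pvCn city_names k)
  let legs := (ss.filter (fun kv => !hubKeys.contains kv.1)).map
      (fun kv => (pvCn city_names kv.1, pvCn city_names kv.2))
  let valid := ((hubKeys.length : Int) == p)
      && (ss.map Prod.snd).all (fun v => hubKeys.contains v)
  (hubs, legs, valid)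

-- ===== PRECONDITION & SPEC =====
-- Pre_ excludes exactly the inputs where Python A raises: an out-of-range city index
-- (IndexError) or, for a non-hub entry, a destination absent from ss (KeyError);
-- duplicate keys are excluded because a Python dict cannot contain them.
def Pre_get_layout_from_sample (ss : List (Int × Int)) (city_names : List String) (p : Int) : Prop :=
  (ss.map Prod.fst).Nodup ∧
  ∀ kv ∈ ss, PySem.Raise.InRange city_names.length kv.1 ∧
    (kv.1 ≠ kv.2 → PySem.Raise.InRange city_names.length kv.2 ∧ kv.2 ∈ ss.map Prod.fst)
instance (ss : List (Int × Int)) (city_names : List String) (p : Int) : Decidable (Pre_get_layout_from_sample ss city_names p) := by unfold Pre_get_layout_from_sample; infer_instance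

def pvWitness_get_layout_from_sample : (List (Int × Int)) × List String × Int :=
  ([(0, 0), (1, 0)], ["A", "B"], 1)

def Spec_get_layout_from_sample (ss : List (Int × Int)) (city_names : List String) (p : Int) (out : List String × (List (String × String)) × Bool) : Prop := out = get_layout_from_sample_alt ss city_names p
instance (ss : List (Int × Int)) (city_names : List String) (p : Int) (out : List String × (List (String × String)) × Bool) : Decidable (Spec_get_layout_from_sample ss city_names p out) := by unfold Spec_get_layout_from_sample; infer_instance

-- ===== CLAIM (what is proved, stated in full; the proofs are below) =====
def Claim_equal_get_layout_from_sample : Prop := ∀ (ss : List (Int × Int)) (city_names : List String) (p : Int), Dom_get_layout_from_sample ss city_names p → Pre_get_layout_from_sample ss city_names p → Spec_get_layout_from_sample ss city_names p (get_layout_from_sample ss city_names p)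

-- ===== LEMMAS AND PROOFS =====

-- A's fold with accumulator (h, l, v) splits into three independent passes.
theorem pv_fold_eq (ss : List (Int × Int)) (cn : List String)
    (xs : List (Int × Int)) (h : List String) (l : List (String × String)) (v : Bool) :
    xs.foldl
      (fun (acc : List String × List (String × String) × Bool) kv =>
        if kv.1 == kv.2 then
          (acc.1 ++ [pvCn cn kv.1], acc.2.1, acc.2.2)
        else
          (acc.1, acc.2.1 ++ [(pvCn cn kv.1, pvCn cn kv.2)],
           if pvDget ss kv.2 != some kv.2 then false else acc.2.2))
      (h, l, v)
    = (h ++ (xs.filter (fun kv => kv.1 == kv.2)).map (fun kv => pvCn cn kv.1),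
       l ++ (xs.filter (fun kv => kv.1 != kv.2)).map
           (fun kv => (pvCn cn kv.1, pvCn cn kv.2)),
       v && (xs.filter (fun kv => kv.1 != kv.2)).all
           (fun kv => pvDget ss kv.2 == some kv.2)) := by
  induction xs generalizing h l v with
  | nil => simp
  | cons x xs ih =>
    simp only [List.foldl_cons, List.filter_cons]
    cases hb : (x.1 == x.2) with
    | true =>
      have hne : (x.1 != x.2) = false := by simp [bne, hb]
      simp only [hne, Bool.false_eq_true, if_true, if_false]
      rw [ih]
      simp
    | false =>
      have hne : (x.1 != x.2) = true := by simp [bne, hb]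
      simp only [hne, Bool.false_eq_true, if_true, if_false]
      rw [ih]
      cases hd : (pvDget ss x.2 == some x.2) with
      | true =>
        have : (pvDget ss x.2 != some x.2) = false := by simp [bne, hd]
        simp [this, hd]
      | false =>
        have : (pvDget ss x.2 != some x.2) = true := by simp [bne, hd]
        simp [this, hd]

theorem pv_valid_eq (a b : Int) (v : Bool) :
    (if a ≠ b then false else v) = ((a == b) && v) := by
  by_cases h : a = b <;> simp [h]

-- unique values under Nodup keys
theorem pv_key_unique (ss : List (Int × Int)) (hnd : (ss.map Prod.fst).Nodup)
    {a b c : Int} (h1 : (a, b) ∈ ss) (h2 : (a, c) ∈ ss) : b = c := by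
  have := List.inj_on_of_nodup_map hnd h1 h2 rfl
  exact congrArg Prod.snd this

-- membership in the hub-key list
theorem pv_mem_K (ss : List (Int × Int)) (x : Int) :
    x ∈ (ss.filter (fun kv => kv.1 == kv.2)).map Prod.fst ↔ (x, x) ∈ ss := by
  simp only [List.mem_map, List.mem_filter, beq_iff_eq]
  constructor
  · rintro ⟨⟨k, v⟩, ⟨hm, he⟩, rfl⟩
    change k = v at he
    subst he
    exact hm
  · intro hm; exact ⟨(x, x), ⟨hm, rfl⟩, rfl⟩

-- for an entry of ss, membership of its key in K is the fixed-point test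
theorem pv_contains_key (ss : List (Int × Int)) (hnd : (ss.map Prod.fst).Nodup)
    {a b : Int} (hm : (a, b) ∈ ss) :
    ((ss.filter (fun kv => kv.1 == kv.2)).map Prod.fst).contains a = (a == b) := by
  rcases hb : (a == b) with _ | _
  · simp only [List.contains_eq_mem, decide_eq_false_iff_not, pv_mem_K]
    intro hmm
    have hba : b = a := pv_key_unique ss hnd hm hmm
    exact absurd hba.symm (beq_eq_false_iff_ne.mp hb)
  · have hab : a = b := beq_iff_eq.mp hb
    subst hab
    simp only [List.contains_eq_mem, decide_eq_true_eq, pv_mem_K]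
    exact hm

-- for a key of ss, the dict self-lookup test is membership in K
theorem pv_lookup_eq_contains (ss : List (Int × Int)) (hnd : (ss.map Prod.fst).Nodup)
    {x : Int} (hx : x ∈ ss.map Prod.fst) :
    (pvDget ss x == some x) = ((ss.filter (fun kv => kv.1 == kv.2)).map Prod.fst).contains x := by
  rcases List.mem_map.mp hx with ⟨⟨k, w⟩, hkw, hk⟩
  cases hk
  have hfind : ss.find? (fun kv => kv.1 == k) = some (k, w) := by
    rcases hf : ss.find? (fun kv => kv.1 == k) with _ | ⟨a, b⟩
    · exact absurd (List.find?_eq_none.mp hf _ hkw) (by simp)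
    · have hab : (a, b) ∈ ss := List.mem_of_find?_eq_some hf
      have ha : a = k := by simpa using List.find?_some hf
      subst ha
      have hbw : b = w := pv_key_unique ss hnd hab hkw
      rw [hf, hbw]
  rcases hb : (w == k) with _ | _
  · simp only [pvDget, hfind, Option.map_some, List.contains_eq_mem, pv_mem_K]
    have h1 : (some w == some k) = false := by simp [beq_eq_false_iff_ne.mp hb]
    rw [h1]
    symm
    simp only [decide_eq_false_iff_not]
    intro hkk
    exact (beq_eq_false_iff_ne.mp hb) (pv_key_unique ss hnd hkw hkk)
  · have hw : w = k := beq_iff_eq.mp hb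
    subst hw
    simp only [pvDget, hfind, Option.map_some, List.contains_eq_mem, pv_mem_K]
    simp [hkw]

-- ===== VERDICT (by name: the statement is the Claim_ definition above) =====
theorem get_layout_from_sample_spec : Claim_equal_get_layout_from_sample := by
  intro ss cn p _ hpre
  obtain ⟨hnd, hcl⟩ := hpre
  unfold Spec_get_layout_from_sample get_layout_from_sample get_layout_from_sample_alt
  rw [pv_fold_eq ss cn ss [] [] true]
  simp only [List.nil_append, Bool.true_and]
  -- the hub-key list is duplicate-free, so Set.ofList keeps it as is
  have hKnd : ((ss.filter (fun kv => kv.1 == kv.2)).map Prod.fst).Nodup := by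
    exact hnd.sublist (List.filter_sublist.map Prod.fst)
  rw [PySem.Set.ofList_eq_self_of_nodup _ hKnd]
  set K := (ss.filter (fun kv => kv.1 == kv.2)).map Prod.fst with hK
  -- hubs coincide
  have hhubs : (ss.filter (fun kv => kv.1 == kv.2)).map (fun kv => pvCn cn kv.1)
      = ((ss.map Prod.fst).filter (fun k => K.contains k)).map (fun k => pvCn cn k) := by
    rw [List.filter_map, List.map_map]
    congr 1
    apply List.filter_congr
    intro kv hm
    exact (pv_contains_key ss hnd hm).symm
  -- legs coincide
  have hlegs : ss.filter (fun kv => kv.1 != kv.2) = ss.filter (fun kv => !K.contains kv.1) := by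
    apply List.filter_congr
    intro kv hm
    rw [pv_contains_key ss hnd hm]
    simp [bne]
  -- validity coincides
  have hlen : ((ss.filter (fun kv => kv.1 == kv.2)).map (fun kv => pvCn cn kv.1)).length
      = K.length := by simp [hK]
  have hall : (ss.filter (fun kv => kv.1 != kv.2)).all (fun kv => pvDget ss kv.2 == some kv.2)
      = (ss.map Prod.snd).all (fun v => K.contains v) := by
    rw [Bool.eq_iff_iff]
    simp only [List.all_eq_true, List.mem_filter, List.mem_map, bne_iff_ne,
      forall_exists_index, and_imp]
    constructor
    · rintro hA v kv hm rfl
      by_cases he : kv.1 = kv.2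
      · rw [← he, pv_contains_key ss hnd hm]; simp [he]
      · rw [← pv_lookup_eq_contains ss hnd ((hcl kv hm).2 he).2]
        exact hA kv hm he
    · intro hB kv hm hne
      rw [pv_lookup_eq_contains ss hnd ((hcl kv hm).2 hne).2]
      exact hB kv.2 kv hm rfl
  simp only [Prod.mk.injEq]
  refine ⟨hhubs, congrArg _ hlegs, ?_⟩
  rw [pv_valid_eq, hall, hlen]
  simp only [PySem.Set.contains_eq_listContains]
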